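-- pv_equiv track=rewrite | github.com/zwisler-a/bachelor-thesis-group-sampling | group_sampling/util/util.py | distribution_with_rest
-- ===== SOURCE A (Python) =====
-- from math import ceil
--
-- def distribution_with_rest(total, group_size):
--     part = max(ceil(total / group_size), 1)
--     sizes = []
--     for j in range(group_size):
--         if j == group_size - 1:
--             sizes.append(max(0, total))
--         else:
--             sizes.append(part if total > 0 else 0)
--             total -= part
--     return sizes
-- ===== SOURCE B (Python) =====
-- from math import ceil
--
-- def distribution_with_rest(total, group_size):
--     # part first, so group_size == 0 still raises ZeroDivisionError like A
--     part = max(ceil(total / group_size), 1)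
--     if group_size <= 0:
--         return []
--     # number of non-final slots that still have something left: ceil(total/part), clamped
--     k = min(group_size - 1, max(0, -(-total // part)))
--     return [part] * k + [0] * (group_size - 1 - k) + [max(0, total - (group_size - 1) * part)]
-- ===== Notes on version B (the rewrite author's own statement) =====
-- stated objective: faster
-- what changed: B replaces A's loop with a mutated running total by a closed-form construction: it computes k, the number of non-final slots that are still positive, as a clamped ceiling division, and builds the list as [part]*k + [0]*(group_size-1-k) + [last] with constant-time list repetition instead of per-slot appends.
import Mathlib
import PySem

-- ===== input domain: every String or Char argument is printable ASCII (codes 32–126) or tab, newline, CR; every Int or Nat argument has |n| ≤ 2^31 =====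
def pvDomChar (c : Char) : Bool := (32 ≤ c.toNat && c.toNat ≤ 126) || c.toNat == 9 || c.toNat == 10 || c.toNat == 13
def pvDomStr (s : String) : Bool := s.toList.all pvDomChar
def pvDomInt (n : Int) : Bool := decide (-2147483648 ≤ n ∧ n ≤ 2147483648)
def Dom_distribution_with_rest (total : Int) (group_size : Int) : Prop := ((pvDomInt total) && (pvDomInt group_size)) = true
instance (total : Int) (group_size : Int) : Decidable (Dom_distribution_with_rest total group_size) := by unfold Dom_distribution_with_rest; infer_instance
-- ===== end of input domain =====

-- B builds the result by a closed-form clamped ceiling division and list repetition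
-- instead of A's per-slot loop with a mutated running total (constant-factor speedup in Python).

-- ===== PORT A =====
-- ceil(total / group_size) in Python is float ceiling division; for |total|, |group_size| ≤ 2^31
-- (the stated Dom) it equals exact integer ceiling division -((-total) // group_size), ported so.
def distribution_with_rest (total : Int) (group_size : Int) : List Int :=
  let part := max (-(PySem.Int.floordiv (-total) group_size)) 1
  ((PySem.List.pyRange 0 group_size 1).foldl
    (fun (st : Int × List Int) j =>
      if j == group_size - 1 then (st.1, st.2 ++ [max 0 st.1])
      else (st.1 - part, st.2 ++ [if st.1 > 0 then part else 0]))
    (total, [])).2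

-- ===== PORT B =====
-- same exact-ceiling port of math.ceil(total / group_size) and of -(-total // part) as above
def distribution_with_rest_alt (total : Int) (group_size : Int) : List Int :=
  let part := max (-(PySem.Int.floordiv (-total) group_size)) 1
  if group_size ≤ 0 then []
  else
    let k := min (group_size - 1) (max 0 (-(PySem.Int.floordiv (-total) part)))
    List.replicate k.toNat part ++ List.replicate (group_size - 1 - k).toNat 0
      ++ [max 0 (total - (group_size - 1) * part)]

-- ===== PRECONDITION & SPEC =====
-- excludes exactly group_size = 0, where Python's A raises ZeroDivisionError
def Pre_distribution_with_rest (total : Int) (group_size : Int) : Prop := group_size ≠ 0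
instance (total : Int) (group_size : Int) : Decidable (Pre_distribution_with_rest total group_size) := by unfold Pre_distribution_with_rest; infer_instance
def pvWitness_distribution_with_rest : Int × Int := (10, 3)

def Spec_distribution_with_rest (total : Int) (group_size : Int) (out : List Int) : Prop := out = distribution_with_rest_alt total group_size
instance (total : Int) (group_size : Int) (out : List Int) : Decidable (Spec_distribution_with_rest total group_size out) := by unfold Spec_distribution_with_rest; infer_instance

-- ===== CLAIM (what is proved, stated in full; the proofs are below) =====
def Claim_equal_distribution_with_rest : Prop := ∀ (total : Int) (group_size : Int), Dom_distribution_with_rest total group_size → Pre_distribution_with_rest total group_size → Spec_distribution_with_rest total group_size (distribution_with_rest total group_size)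

-- ===== LEMMAS AND PROOFS =====

-- the loop's "still positive" test in terms of the ceiling division -((-t) // part)
lemma pos_iff_lt_ceil (t part j : Int) (hp : 0 < part) :
    (t - j * part > 0) ↔ j < -(PySem.Int.floordiv (-t) part) := by
  have h := (PySem.Int.floordiv_eq_iff_of_pos (a := -t) (b := part)
    (q := PySem.Int.floordiv (-t) part) hp).mp rfl
  set q := PySem.Int.floordiv (-t) part with hq
  constructor
  · intro hpos
    by_contra hle
    have : (-j) * part ≤ q * part :=
      mul_le_mul_of_nonneg_right (by omega) (le_of_lt hp)
    nlinarith [h.1]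
  · intro hlt
    have : (q + 1) * part ≤ (-j) * part :=
      mul_le_mul_of_nonneg_right (by omega) (le_of_lt hp)
    nlinarith [h.2]

-- the non-final slots of A's loop: folding m steps from t yields a closed-form state
lemma fold_prefix (t part : Int) (hp : 0 < part) (m : Nat) :
    (PySem.List.pyRange 0 (m : Int) 1).foldl
        (fun (st : Int × List Int) _ =>
          (st.1 - part, st.2 ++ [if st.1 > 0 then part else 0]))
        (t, [])
      = (t - (m : Int) * part,
         List.replicate (min m (max 0 (-(PySem.Int.floordiv (-t) part))).toNat) part
           ++ List.replicate (m - min m (max 0 (-(PySem.Int.floordiv (-t) part))).toNat) 0) := by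
  induction m with
  | zero => simp [PySem.List.pyRange_one_eq_nil]
  | succ m ih =>
    have hsplit : PySem.List.pyRange 0 ((m + 1 : Nat) : Int) 1
        = PySem.List.pyRange 0 (m : Int) 1 ++ [(m : Int)] := by
      push_cast
      exact PySem.List.pyRange_one_succ_right (by positivity)
    rw [hsplit, List.foldl_append, ih]
    simp only [List.foldl_cons, List.foldl_nil]
    set c := -(PySem.Int.floordiv (-t) part) with hc
    have hiff : (t - (m : Int) * part > 0) ↔ (m : Int) < c := pos_iff_lt_ceil t part m hp
    by_cases hmc : (m : Int) < c
    · have hmin : min m (max 0 c).toNat = m := by omega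
      have hmin' : min (m + 1) (max 0 c).toNat = m + 1 := by omega
      rw [if_pos (hiff.mpr hmc)]
      refine Prod.ext ?_ ?_
      · simp; ring
      · simp [hmin, hmin', List.replicate_succ' (n := m)]
    · have hcm : c ≤ (m : Int) := le_of_not_gt hmc
      have hmin : min m (max 0 c).toNat = (max 0 c).toNat := by omega
      have hmin' : min (m + 1) (max 0 c).toNat = (max 0 c).toNat := by omega
      rw [if_neg (by rw [hiff]; omega)]
      refine Prod.ext ?_ ?_
      · simp; ring
      · have hz : m + 1 - (max 0 c).toNat = (m - (max 0 c).toNat) + 1 := by omega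
        simp [hmin, hmin', hz, List.replicate_succ' (n := m - (max 0 c).toNat)]

-- ===== VERDICT (by name: the statement is the Claim_ definition above) =====
theorem distribution_with_rest_spec : Claim_equal_distribution_with_rest := by
  intro total group_size _ hpre
  unfold Spec_distribution_with_rest distribution_with_rest distribution_with_rest_alt
  dsimp only
  generalize hpart : max (-(PySem.Int.floordiv (-total) group_size)) 1 = part
  have hp : 0 < part := hpart ▸ lt_of_lt_of_le one_pos (le_max_right _ _)
  by_cases hg : group_size ≤ 0
  · rw [if_pos hg, PySem.List.pyRange_one_eq_nil (by omega)]
    simp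
  · rw [if_neg hg]
    have h1 : (1 : Int) ≤ group_size := by omega
    -- split off the final index
    have hm : group_size - 1 = ((group_size - 1).toNat : Int) := by omega
    have hsplit : PySem.List.pyRange 0 group_size 1
        = PySem.List.pyRange 0 (group_size - 1) 1 ++ [group_size - 1] := by
      have h := PySem.List.pyRange_one_succ_right (a := 0) (b := group_size - 1) (by omega)
      simpa using h
    rw [hsplit, List.foldl_append]
    -- on the prefix, j ≠ group_size - 1, so the branch taken is the non-final one
    rw [PySem.List.foldl_congr_mem (PySem.List.pyRange 0 (group_size - 1) 1) _
      (fun (st : Int × List Int) _ =>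
        (st.1 - part, st.2 ++ [if st.1 > 0 then part else 0])) _
      (by
        intro acc x hx
        have hlt : x < group_size - 1 := (PySem.List.mem_pyRange_one.mp hx).2
        have hne : (x == group_size - 1) = false := by simp; omega
        simp [hne])]
    rw [hm, fold_prefix total part hp]
    simp only [List.foldl_cons, List.foldl_nil, beq_self_eq_true, if_pos]
    rw [← hm]
    set c := -(PySem.Int.floordiv (-total) part) with hc
    have hk : (min (group_size - 1) (max 0 c)).toNat
        = min (group_size - 1).toNat (max 0 c).toNat := by omega
    have hk2 : (group_size - 1 - min (group_size - 1) (max 0 c)).toNat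
        = (group_size - 1).toNat - min (group_size - 1).toNat (max 0 c).toNat := by omega
    rw [hk, hk2]
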